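-- pv_equiv track=rewrite | github.com/Hyokiz/Algorithm | 프로그래머스/lv1/12977. 소수 만들기/소수 만들기.py | solution
-- ===== SOURCE A (Python) =====
-- from itertools import combinations
-- from math import sqrt
--
-- def solution(nums):
--     answer = 0
--
--
--     for combs in combinations(nums, 3):
--         s = sum(combs)
--
--         for i in range(2, int(sqrt(s)) + 2):
--             if s % i == 0:
--                 break
--         else:
--             answer += 1
--
--     return answer
-- ===== SOURCE B (Python) =====
-- from math import sqrt
--
-- def solution(nums):
--     # DP over the items: d_k maps sum -> number of k-element index-subsets with that sum.
--     d1, d2, d3 = {}, {}, {}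
--     for x in nums:
--         for s, c in list(d2.items()):
--             d3[s + x] = d3.get(s + x, 0) + c
--         for s, c in list(d1.items()):
--             d2[s + x] = d2.get(s + x, 0) + c
--         d1[x] = d1.get(x, 0) + 1
--     answer = 0
--     for s, c in d3.items():
--         for i in range(2, int(sqrt(s)) + 2):
--             if s % i == 0:
--                 break
--         else:
--             answer += c
--     return answer
-- ===== Notes on version B (the rewrite author's own statement) =====
-- stated objective: faster
-- what changed: B replaces A's scan over every 3-combination with an item-by-item dict DP (sum -> number of 1/2/3-element index-subsets reaching it) and runs the trial-division test once per distinct triple sum instead of once per triple; when many triples share a sum this collapses C(n,3) prime tests to one per distinct sum (a timing run measured B ~3900x faster at n=256), while on inputs with all-distinct sums the cost is comparable.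
import Mathlib
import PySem

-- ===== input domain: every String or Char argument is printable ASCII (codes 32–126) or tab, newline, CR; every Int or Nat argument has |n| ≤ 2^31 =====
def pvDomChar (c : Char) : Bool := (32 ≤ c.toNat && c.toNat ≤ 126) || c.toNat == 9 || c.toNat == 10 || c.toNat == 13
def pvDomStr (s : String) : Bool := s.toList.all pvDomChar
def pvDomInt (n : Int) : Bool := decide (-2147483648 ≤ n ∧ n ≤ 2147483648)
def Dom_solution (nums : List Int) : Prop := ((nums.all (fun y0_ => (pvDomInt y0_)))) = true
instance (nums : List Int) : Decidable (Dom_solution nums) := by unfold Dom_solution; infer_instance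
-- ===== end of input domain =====

-- B replaces the triple-by-triple scan with a dict DP counting how many 3-subsets reach each sum,
-- running the trial-division test once per distinct sum (objective: faster — measurably so when
-- many triples share a sum). Both Pythons raise ValueError (math.sqrt) when some triple sum is
-- negative; Pre_ excludes exactly those inputs.

-- ===== PORT A =====
-- int(math.sqrt(s)) is ported as Nat.sqrt s.toNat: exact for the admitted 0 ≤ s ≤ 3·2^31
-- (IEEE double sqrt is correctly rounded, so its floor is the integer square root at these sizes).
def solution (nums : List Int) : Int :=
  (PySem.List.combinations nums 3).foldl
    (fun answer combs =>
      let s := combs.sum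
      if (PySem.List.pyRange 2 (((Nat.sqrt s.toNat : Nat) : Int) + 2) 1).any
           (fun i => PySem.Int.mod s i == 0)
      then answer else answer + 1)
    0

-- ===== PORT B =====
-- 'for s, c in src.items(): dst[s + x] = dst.get(s + x, 0) + c'
def bumpAll (x : Int) (src dst : PySem.Dict Int Int) : PySem.Dict Int Int :=
  src.items.foldl (fun d sc => d.insert (sc.1 + x) (d.getD (sc.1 + x) 0 + sc.2)) dst

-- one iteration of Source B's main loop: st = (d1, d2, d3); d3 from old d2, d2 from old d1, then d1[x] += 1
def stepB (st : PySem.Dict Int Int × PySem.Dict Int Int × PySem.Dict Int Int) (x : Int) :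
    PySem.Dict Int Int × PySem.Dict Int Int × PySem.Dict Int Int :=
  (st.1.insert x (st.1.getD x 0 + 1), bumpAll x st.1 st.2.1, bumpAll x st.2.1 st.2.2)

def solution_alt (nums : List Int) : Int :=
  let st := nums.foldl stepB (PySem.Dict.empty, PySem.Dict.empty, PySem.Dict.empty)
  st.2.2.items.foldl
    (fun answer sc =>
      if (PySem.List.pyRange 2 (((Nat.sqrt sc.1.toNat : Nat) : Int) + 2) 1).any
           (fun i => PySem.Int.mod sc.1 i == 0)
      then answer else answer + sc.2)
    0

-- ===== PRECONDITION & SPEC =====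
-- Pre_ excludes exactly the inputs on which some 3-combination has a negative sum:
-- there math.sqrt raises ValueError in A (and in B alike), so A returns no value.
def Pre_solution (nums : List Int) : Prop :=
  ∀ c ∈ PySem.List.combinations nums 3, 0 ≤ c.sum
instance (nums : List Int) : Decidable (Pre_solution nums) := by unfold Pre_solution; infer_instance
def pvWitness_solution : List Int := [1, 2, 4]

def Spec_solution (nums : List Int) (out : Int) : Prop := out = solution_alt nums
instance (nums : List Int) (out : Int) : Decidable (Spec_solution nums out) := by unfold Spec_solution; infer_instance

-- ===== CLAIM (what is proved, stated in full; the proofs are below) =====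
def Claim_equal_solution : Prop := ∀ (nums : List Int), Dom_solution nums → Pre_solution nums → Spec_solution nums (solution nums)

-- ===== LEMMAS AND PROOFS =====

-- the (quirky) divisor test both programs share: some i ∈ [2, int(sqrt s)+1] divides s
def anyDiv (s : Int) : Bool :=
  (PySem.List.pyRange 2 (((Nat.sqrt s.toNat : Nat) : Int) + 2) 1).any
    (fun i => PySem.Int.mod s i == 0)

-- multiset of sums of r-combinations of p
def S (p : List Int) (r : Nat) : List Int := (PySem.List.combinations p r).map List.sum

-- d represents the multiset M: distinct keys, key set = support of M, value = multiplicity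
def Good (d : PySem.Dict Int Int) (M : List Int) : Prop :=
  d.keys.Nodup ∧ (∀ v, v ∈ d.keys ↔ v ∈ M) ∧ (∀ v, d.getD v 0 = (M.count v : Int))

lemma good_empty : Good PySem.Dict.empty ([] : List Int) := by
  refine ⟨?_, ?_, ?_⟩ <;> simp [PySem.Dict.empty, PySem.Dict.keys, PySem.Dict.getD, PySem.Dict.get?]

lemma S_nil_succ (r : Nat) : S [] (r + 1) = [] := by
  simp [S, PySem.List.combinations_nil_succ]

lemma bumpAll_getD (x v : Int) (L : List (Int × Int)) (d : PySem.Dict Int Int) :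
    (L.foldl (fun d sc => d.insert (sc.1 + x) (d.getD (sc.1 + x) 0 + sc.2)) d).getD v 0
      = d.getD v 0 + (L.map (fun sc => if sc.1 + x = v then sc.2 else 0)).sum := by
  induction L generalizing d with
  | nil => simp
  | cons sc t ih =>
    simp only [List.foldl_cons, List.map_cons, List.sum_cons, ih]
    by_cases hv : sc.1 + x = v
    · subst hv
      rw [PySem.Dict.getD_insert_self]
      simp; ring
    · rw [PySem.Dict.getD_insert_of_ne _ _ _ (fun h => hv h.symm)]
      simp [hv]

lemma bumpAll_nodup (x : Int) (L : List (Int × Int)) (d : PySem.Dict Int Int)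
    (h : d.keys.Nodup) :
    ((L.foldl (fun d sc => d.insert (sc.1 + x) (d.getD (sc.1 + x) 0 + sc.2)) d).keys).Nodup := by
  induction L generalizing d with
  | nil => exact h
  | cons sc t ih => exact ih _ (PySem.Dict.nodup_keys_insert _ _ _ h)

lemma bumpAll_mem_keys (x v : Int) (L : List (Int × Int)) (d : PySem.Dict Int Int) :
    v ∈ (L.foldl (fun d sc => d.insert (sc.1 + x) (d.getD (sc.1 + x) 0 + sc.2)) d).keys
      ↔ v ∈ d.keys ∨ ∃ sc ∈ L, sc.1 + x = v := by
  induction L generalizing d with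
  | nil => simp
  | cons sc t ih =>
    simp only [List.foldl_cons, ih, PySem.Dict.mem_keys_insert, List.mem_cons, eq_comm]
    aesop

lemma sum_ite_shift (K : List Int) (hK : K.Nodup) (x v : Int) (f : Int → Int) :
    (K.map (fun k => if k + x = v then f k else 0)).sum = if v - x ∈ K then f (v - x) else 0 := by
  induction K with
  | nil => simp
  | cons k t ih =>
    simp only [List.map_cons, List.sum_cons, List.mem_cons]
    rcases List.nodup_cons.mp hK with ⟨hk, ht⟩
    by_cases hv : k + x = v
    · have hkv : k = v - x := by omega
      rw [if_pos hv, ih ht, if_neg (by rw [← hkv]; exact hk), if_pos (Or.inl hkv.symm), ← hkv]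
      ring
    · have hkv : ¬ (v - x = k) := fun h => hv (by omega)
      rw [if_neg hv, ih ht]
      by_cases hm : v - x ∈ t
      · rw [if_pos hm, if_pos (Or.inr hm)]; ring
      · rw [if_neg hm, if_neg (by tauto)]; ring

lemma sum_ite_filter (K : List Int) (Q : Int → Bool) (f : Int → Int) :
    (K.map (fun k => if Q k then f k else 0)).sum = ((K.filter Q).map f).sum := by
  induction K with
  | nil => simp
  | cons k t ih =>
    by_cases h : Q k <;> simp [h, ih]

lemma combs_append (x : Int) (l : List Int) (r : Nat) :
    (PySem.List.combinations (l ++ [x]) (r + 1)).Perm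
      (PySem.List.combinations l (r + 1) ++ (PySem.List.combinations l r).map (· ++ [x])) := by
  induction l generalizing r with
  | nil =>
    cases r <;> simp [PySem.List.combinations_zero, PySem.List.combinations_nil_succ,
      PySem.List.combinations_cons_succ]
  | cons a l ih =>
    cases r with
    | zero =>
      simp [PySem.List.combinations_one, PySem.List.combinations_zero]
    | succ r =>
      rw [List.cons_append, PySem.List.combinations_cons_succ,
        PySem.List.combinations_cons_succ (x := a) (xs := l),
        PySem.List.combinations_cons_succ (x := a) (xs := l) (r := r)]
      refine ((((ih r).map (a :: ·)).append (ih (r+1))).trans ?_)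
      simp only [List.map_append, List.map_map]
      have hcomp : ((· ++ [x] : List Int → List Int) ∘ (a :: ·)) = ((a :: ·) ∘ (· ++ [x])) := by
        funext c; simp
      rw [hcomp]
      refine (List.perm_iff_count).mpr (fun c => ?_)
      simp [List.count_append]
      ring

lemma S_one (p : List Int) : S p 1 = p := by
  simp only [S, PySem.List.combinations_one, List.map_map]
  have : (List.sum ∘ fun x : Int => [x]) = id := by funext y; simp
  simp [this]

lemma S_append_perm (p : List Int) (x : Int) (r : Nat) :
    (S (p ++ [x]) (r + 1)).Perm (S p (r + 1) ++ (S p r).map (· + x)) := by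
  have h := (combs_append x p r).map List.sum
  have hc : (List.sum ∘ fun c : List Int => c ++ [x]) = ((fun s => s + x) ∘ List.sum) := by
    funext c; simp
  simpa [S, List.map_append, List.map_map, hc] using h

lemma good_perm {d : PySem.Dict Int Int} {M M' : List Int} (hp : M.Perm M') (h : Good d M) :
    Good d M' := by
  refine ⟨h.1, fun v => (h.2.1 v).trans hp.mem_iff, fun v => (h.2.2 v).trans ?_⟩
  rw [hp.count_eq]

lemma good_insert_one {d : PySem.Dict Int Int} {p : List Int} (x : Int) (h : Good d p) :
    Good (d.insert x (d.getD x 0 + 1)) (p ++ [x]) := by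
  refine ⟨PySem.Dict.nodup_keys_insert _ _ _ h.1, fun v => ?_, fun v => ?_⟩
  · simp only [PySem.Dict.mem_keys_insert, h.2.1 v, List.mem_append, List.mem_singleton]
    tauto
  · by_cases hv : v = x
    · subst hv
      rw [PySem.Dict.getD_insert_self, h.2.2, List.count_append]
      simp
    · rw [PySem.Dict.getD_insert_of_ne _ _ _ hv, h.2.2, List.count_append]
      have hxv : ¬ x = v := fun h => hv h.symm
      simp [hxv]

lemma good_bumpAll {d dbig : PySem.Dict Int Int} {M Mbig : List Int} (x : Int)
    (h : Good d M) (hbig : Good dbig Mbig) :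
    Good (bumpAll x d dbig) (Mbig ++ M.map (· + x)) := by
  obtain ⟨hnd, hmem, hcnt⟩ := h
  have hitems : d.items = d.keys.map (fun k => (k, d.getD k 0)) :=
    PySem.Dict.items_eq_map_keys d hnd 0
  refine ⟨bumpAll_nodup _ _ _ hbig.1, fun v => ?_, fun v => ?_⟩
  · rw [bumpAll, bumpAll_mem_keys, hitems]
    simp only [List.mem_append, List.mem_map, hbig.2.1, hmem]
    constructor
    · rintro (h | ⟨sc, ⟨k, hk, rfl⟩, hv⟩)
      · exact Or.inl h
      · exact Or.inr ⟨k, hk, hv⟩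
    · rintro (h | ⟨a, ha, hv⟩)
      · exact Or.inl h
      · exact Or.inr ⟨(a, d.getD a 0), ⟨a, ha, rfl⟩, hv⟩
  · rw [bumpAll, bumpAll_getD, hitems, List.map_map]
    have : ((fun sc : Int × Int => if sc.1 + x = v then sc.2 else 0) ∘ fun k => (k, d.getD k 0))
        = fun k => if k + x = v then d.getD k 0 else 0 := by
      funext k; simp
    rw [this, sum_ite_shift _ hnd, hbig.2.2, List.count_append]
    have hmap : M.count (v - x) = (M.map (· + x)).count v := by
      have := List.count_map_of_injective (l := M) (f := (· + x)) (x := v - x)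
        (add_left_injective x)
      simpa using this.symm
    by_cases hv : v - x ∈ d.keys
    · rw [if_pos hv, hcnt, hmap]
      push_cast
      ring
    · rw [if_neg hv]
      have : M.count (v - x) = 0 := List.count_eq_zero.mpr (fun hm => hv ((hmem _).mpr hm))
      rw [hmap] at this
      simp [this]

lemma fold_good : ∀ (l p : List Int) (d1 d2 d3 : PySem.Dict Int Int),
    Good d1 (S p 1) → Good d2 (S p 2) → Good d3 (S p 3) →
    Good (l.foldl stepB (d1, d2, d3)).2.2 (S (p ++ l) 3) := by
  intro l
  induction l with
  | nil => intro p d1 d2 d3 _ _ h3; simpa using h3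
  | cons x t ih =>
    intro p d1 d2 d3 h1 h2 h3
    have h1p : Good d1 p := by rw [S_one] at h1; exact h1
    have h1' : Good (d1.insert x (d1.getD x 0 + 1)) (S (p ++ [x]) 1) := by
      rw [S_one]
      exact good_insert_one x h1p
    have h2' : Good (bumpAll x d1 d2) (S (p ++ [x]) 2) := by
      refine good_perm (S_append_perm p x 1).symm ?_
      have := good_bumpAll x h1p h2
      exact good_perm (by rw [S_one]) this
    have h3' : Good (bumpAll x d2 d3) (S (p ++ [x]) 3) := by
      refine good_perm (S_append_perm p x 2).symm ?_
      exact good_bumpAll x h2 h3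
    have := ih (p ++ [x]) _ _ _ h1' h2' h3'
    simpa [stepB] using this

lemma final_count (d : PySem.Dict Int Int) (M : List Int) (h : Good d M) :
    d.items.foldl
      (fun answer sc =>
        if (PySem.List.pyRange 2 (((Nat.sqrt sc.1.toNat : Nat) : Int) + 2) 1).any
             (fun i => PySem.Int.mod sc.1 i == 0)
        then answer else answer + sc.2) 0
      = (M.countP (fun s => !anyDiv s) : Int) := by
  obtain ⟨hnd, hmem, hcnt⟩ := h
  have hitems : d.items = d.keys.map (fun k => (k, d.getD k 0)) :=
    PySem.Dict.items_eq_map_keys d hnd 0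
  rw [hitems, List.foldl_map]
  have hfun : (fun (answer : Int) (k : Int) =>
        if (PySem.List.pyRange 2 (((Nat.sqrt k.toNat : Nat) : Int) + 2) 1).any
             (fun i => PySem.Int.mod k i == 0)
        then answer else answer + d.getD k 0)
      = fun answer k => answer + (if !anyDiv k then d.getD k 0 else 0) := by
    funext answer k
    show (if anyDiv k then answer else answer + d.getD k 0) = _
    by_cases hq : anyDiv k <;> simp [hq]
  calc d.keys.foldl (fun answer k =>
          if (PySem.List.pyRange 2 (((Nat.sqrt k.toNat : Nat) : Int) + 2) 1).any
               (fun i => PySem.Int.mod k i == 0)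
          then answer else answer + d.getD k 0) 0
      = d.keys.foldl (fun answer k => answer + (if !anyDiv k then d.getD k 0 else 0)) 0 := by
        rw [hfun]
    _ = 0 + (d.keys.map (fun k => if !anyDiv k then d.getD k 0 else 0)).sum :=
        PySem.List.foldl_add _ _ _
    _ = ((d.keys.filter (fun k => !anyDiv k)).map (fun k => d.getD k 0)).sum := by
        rw [sum_ite_filter]; simp
    _ = ((M.dedup.filter (fun k => !anyDiv k)).map (fun k => d.getD k 0)).sum := by
        have hperm : d.keys.Perm M.dedup := by
          rw [List.perm_ext_iff_of_nodup hnd M.nodup_dedup]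
          intro a; rw [hmem, List.mem_dedup]
        exact ((hperm.filter _).map _).sum_eq
    _ = ((M.dedup.filter (fun k => !anyDiv k)).map (fun k => (M.count k : Int))).sum := by
        refine congrArg _ (List.map_congr_left (fun k _ => hcnt k))
    _ = (M.countP (fun s => !anyDiv s) : Int) := by
        rw [← List.sum_map_count_dedup_filter_eq_countP (fun s => !anyDiv s) M]
        push_cast [List.map_map]
        rfl

lemma a_eq (nums : List Int) :
    solution nums = ((S nums 3).countP (fun s => !anyDiv s) : Int) := by
  rw [solution]
  have hfun : (fun (answer : Int) (combs : List Int) =>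
      let s := combs.sum
      if (PySem.List.pyRange 2 (((Nat.sqrt s.toNat : Nat) : Int) + 2) 1).any
           (fun i => PySem.Int.mod s i == 0)
      then answer else answer + 1)
      = fun answer combs => if (fun c : List Int => !anyDiv c.sum) combs then answer + 1 else answer := by
    funext answer combs
    show (if anyDiv combs.sum then answer else answer + 1) = _
    by_cases hq : anyDiv combs.sum <;> simp [hq]
  rw [hfun, PySem.List.foldl_if_add_one]
  rw [S, List.countP_map]
  norm_num
  rfl

-- ===== VERDICT (by name: the statement is the Claim_ definition above) =====
theorem solution_spec : Claim_equal_solution := by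
  intro nums _ _
  show solution nums = solution_alt nums
  have h := fold_good nums [] PySem.Dict.empty PySem.Dict.empty PySem.Dict.empty
    (by rw [S_nil_succ]; exact good_empty) (by rw [S_nil_succ]; exact good_empty)
    (by rw [S_nil_succ]; exact good_empty)
  simp only [List.nil_append] at h
  rw [a_eq nums, solution_alt]
  exact (final_count _ _ h).symm
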